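-- pv_equiv track=rewrite | github.com/RBVI/ChimeraX | src/bundles/maestro/src/io.py | _split_key
-- ===== SOURCE A (Python) =====
-- def _split_key(key, limit):
--     parts = []
--     current = []
--     escape = False
--     for c in key:
--         if escape:
--             current.append(c)
--             escape = False
--         elif c == '\\':
--             escape = True
--         elif c == '_':
--             if len(parts) < limit:
--                 parts.append(''.join(current))
--                 current = []
--             else:
--                 current.append(' ')
--         else:
--             current.append(c)
--     if current:
--         parts.append(''.join(current))
--     return parts
-- ===== SOURCE B (Python) =====
-- def _split_key(key, limit):
--     # Phase 1: resolve escapes into a flat list of units: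
--     # a literal character, or None for each unescaped underscore.
--     units = []
--     i, n = 0, len(key)
--     while i < n:
--         c = key[i]
--         if c == '\\':
--             if i + 1 < n:
--                 units.append(key[i + 1])
--             i += 2
--         elif c == '_':
--             units.append(None)
--             i += 1
--         else:
--             units.append(c)
--             i += 1
--     # Phase 2: split the units at the delimiters into segments,
--     # keep the first k as parts, join the rest with spaces.
--     segments = [[]]
--     for u in units:
--         if u is None:
--             segments.append([])
--         else:
--             segments[-1].append(u)
--     k = min(max(limit, 0), len(segments) - 1)
--     tail = ' '.join(''.join(s) for s in segments[k:])
--     return [''.join(s) for s in segments[:k]] + ([tail] if tail else [])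
-- ===== Notes on version B (the rewrite author's own statement) =====
-- stated objective: alternative
-- what changed: Replaces A's single interleaved escape/underscore state machine with a two-phase pipeline: one pass resolves escapes into a flat list of literal/delimiter units, then the units are split into segments and reassembled by taking the first min(limit, #segments-1) segments as parts and space-joining the remainder into an optional final part.
import Mathlib
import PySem

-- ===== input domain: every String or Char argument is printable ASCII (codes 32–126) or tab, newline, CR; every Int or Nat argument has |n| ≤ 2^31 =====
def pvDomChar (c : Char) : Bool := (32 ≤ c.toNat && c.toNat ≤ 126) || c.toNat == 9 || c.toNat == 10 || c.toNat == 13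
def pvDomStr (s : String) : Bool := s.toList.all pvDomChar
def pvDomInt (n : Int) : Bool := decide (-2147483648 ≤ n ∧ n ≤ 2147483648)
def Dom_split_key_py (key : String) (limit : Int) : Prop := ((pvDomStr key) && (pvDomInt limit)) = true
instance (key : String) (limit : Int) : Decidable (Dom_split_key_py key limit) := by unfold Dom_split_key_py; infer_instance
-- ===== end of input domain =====

-- B re-decomposes A's interleaved escape/split state machine into a tokenize-then-assemble
-- pipeline (objective: alternative decomposition, same asymptotic cost).

-- ===== PORT A =====
-- one step of A's for-loop; state = (parts, current, escape)
def pvStepA (limit : Int) (st : List String × List Char × Bool) (c : Char) :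
    List String × List Char × Bool :=
  match st with
  | (parts, current, escape) =>
    if escape then (parts, current ++ [c], false)
    else if c = '\\' then (parts, current, true)
    else if c = '_' then
      if (parts.length : Int) < limit then (parts ++ [String.mk current], [], false)
      else (parts, current ++ [' '], false)
    else (parts, current ++ [c], false)

def split_key_py (key : String) (limit : Int) : List String :=
  let st := key.toList.foldl (pvStepA limit) ([], [], false)
  if st.2.1 = [] then st.1 else st.1 ++ [String.mk st.2.1]

-- ===== PORT B =====
-- phase 1's while-loop with lookahead, as recursion over the char list:
-- a unit is `some c` (literal char) or `none` (unescaped underscore delimiter)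
def pvUnits : List Char → List (Option Char)
  | [] => []
  | c :: rest =>
    if c = '\\' then
      match rest with
      | [] => []                              -- dangling backslash contributes nothing
      | d :: rest' => some d :: pvUnits rest'
    else if c = '_' then none :: pvUnits rest
    else some c :: pvUnits rest

def split_key_py_alt (key : String) (limit : Int) : List String :=
  let units := pvUnits key.toList
  -- phase 2: split the units at the delimiters into segments (state = (done, last))
  let p := units.foldl (fun (acc : List (List Char) × List Char) u =>
      match u with
      | none => (acc.1 ++ [acc.2], [])
      | some c => (acc.1, acc.2 ++ [c])) ([], [])
  let segments := p.1 ++ [p.2]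
  let k := min (max limit 0).toNat (segments.length - 1)
  let tail := List.intercalate [' '] (segments.drop k)
  (segments.take k).map String.mk ++ (if tail = [] then [] else [String.mk tail])

-- ===== PRECONDITION & SPEC =====
def Spec_split_key_py (key : String) (limit : Int) (out : List String) : Prop := out = split_key_py_alt key limit
instance (key : String) (limit : Int) (out : List String) : Decidable (Spec_split_key_py key limit out) := by unfold Spec_split_key_py; infer_instance

-- ===== CLAIM (what is proved, stated in full; the proofs are below) =====
def Claim_equal_split_key_py : Prop := ∀ (key : String) (limit : Int), Dom_split_key_py key limit → Spec_split_key_py key limit (split_key_py key limit)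

-- ===== LEMMAS AND PROOFS =====

-- prepend a chunk to the first segment
def pvPrep (s : List Char) : List (List Char) → List (List Char)
  | [] => [s]
  | t :: ts => (s ++ t) :: ts

-- right-fold formulation of phase 2's segment splitting
def pvSegsR : List (Option Char) → List (List Char)
  | [] => [[]]
  | none :: us => [] :: pvSegsR us
  | some c :: us => pvPrep [c] (pvSegsR us)

-- the assembly (take/drop/space-join) step of B, with budget b
def pvAsm (b : Nat) (S : List (List Char)) : List String :=
  (S.take (min b (S.length - 1))).map String.mk ++
  (if List.intercalate [' '] (S.drop (min b (S.length - 1))) = [] then []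
   else [String.mk (List.intercalate [' '] (S.drop (min b (S.length - 1))))])

theorem pvSegsR_ne_nil (us : List (Option Char)) : pvSegsR us ≠ [] := by
  induction us with
  | nil => simp [pvSegsR]
  | cons u us ih =>
    cases u with
    | none => simp [pvSegsR]
    | some c =>
      simp only [pvSegsR]
      cases h : pvSegsR us with
      | nil => exact absurd h ih
      | cons t ts => simp [pvPrep]

theorem pvPrep_nil {S : List (List Char)} (h : S ≠ []) : pvPrep [] S = S := by
  cases S with
  | nil => exact absurd rfl h
  | cons t ts => simp [pvPrep]

theorem pvPrep_prep (a b : List Char) (S : List (List Char)) :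
    pvPrep a (pvPrep b S) = pvPrep (a ++ b) S := by
  cases S <;> simp [pvPrep]

-- left fold of B's phase 2 equals the right-fold formulation
theorem pvSegs_bridge (us : List (Option Char)) :
    ∀ (fin : List (List Char)) (cur : List Char),
    (us.foldl (fun (acc : List (List Char) × List Char) u =>
        match u with
        | none => (acc.1 ++ [acc.2], [])
        | some c => (acc.1, acc.2 ++ [c])) (fin, cur)).1 ++
    [(us.foldl (fun (acc : List (List Char) × List Char) u =>
        match u with
        | none => (acc.1 ++ [acc.2], [])
        | some c => (acc.1, acc.2 ++ [c])) (fin, cur)).2] = fin ++ pvPrep cur (pvSegsR us) := by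
  induction us with
  | nil => intro fin cur; simp [pvSegsR, pvPrep]
  | cons u us ih =>
    intro fin cur
    cases u with
    | none =>
      simp only [List.foldl_cons]
      rw [ih (fin ++ [cur]) []]
      rw [pvPrep_nil (pvSegsR_ne_nil us)]
      simp [pvSegsR, pvPrep]
    | some c =>
      simp only [List.foldl_cons]
      rw [ih fin (cur ++ [c])]
      simp [pvSegsR, pvPrep_prep]

-- one step of the unit machine (A's underscore/literal handling on resolved units)
def pvStepU (limit : Int) (st : List String × List Char) (u : Option Char) :
    List String × List Char :=
  match u with
  | some c => (st.1, st.2 ++ [c])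
  | none =>
    if (st.1.length : Int) < limit then (st.1 ++ [String.mk st.2], [])
    else (st.1, st.2 ++ [' '])

def pvFin (st : List String × List Char) : List String :=
  if st.2 = [] then st.1 else st.1 ++ [String.mk st.2]

-- A's char machine projects onto the unit machine over the resolved units
theorem pvA_to_units (limit : Int) (l : List Char) :
    ∀ (parts : List String) (cur : List Char),
    ((l.foldl (pvStepA limit) (parts, cur, false)).1,
     (l.foldl (pvStepA limit) (parts, cur, false)).2.1) =
    (pvUnits l).foldl (pvStepU limit) (parts, cur) := by
  induction l using pvUnits.induct with
  | case1 => intro parts cur; simp [pvUnits]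
  | case2 =>
    intro parts cur
    simp [pvUnits, pvStepA, List.foldl]
  | case3 d rest' ih =>
    intro parts cur
    rw [show pvUnits ('\\' :: d :: rest') = some d :: pvUnits rest' from by
      simp [pvUnits]]
    simp only [List.foldl_cons]
    rw [show pvStepA limit (parts, cur, false) '\\' = (parts, cur, true) from by
      simp [pvStepA]]
    rw [show pvStepA limit (parts, cur, true) d = (parts, cur ++ [d], false) from by
      simp [pvStepA]]
    rw [show pvStepU limit (parts, cur) (some d) = (parts, cur ++ [d]) from rfl]
    exact ih parts (cur ++ [d])
  | case4 rest' h ih =>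
    intro parts cur
    rw [show pvUnits ('_' :: rest') = none :: pvUnits rest' from by
      rw [pvUnits.eq_def]; simp]
    simp only [List.foldl_cons]
    by_cases hl : (parts.length : Int) < limit
    · rw [show pvStepA limit (parts, cur, false) '_' = (parts ++ [String.mk cur], [], false) from by
        simp [pvStepA, hl]]
      rw [show pvStepU limit (parts, cur) none = (parts ++ [String.mk cur], []) from by
        simp [pvStepU, hl]]
      exact ih (parts ++ [String.mk cur]) []
    · rw [show pvStepA limit (parts, cur, false) '_' = (parts, cur ++ [' '], false) from by
        simp [pvStepA, hl]]
      rw [show pvStepU limit (parts, cur) none = (parts, cur ++ [' ']) from by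
        simp [pvStepU, hl]]
      exact ih parts (cur ++ [' '])
  | case5 c rest h1 h2 ih =>
    intro parts cur
    rw [show pvUnits (c :: rest) = some c :: pvUnits rest from by
      rw [pvUnits.eq_def]; simp [h1, h2]]
    simp only [List.foldl_cons]
    rw [show pvStepA limit (parts, cur, false) c = (parts, cur ++ [c], false) from by
      simp [pvStepA, h1, h2]]
    rw [show pvStepU limit (parts, cur) (some c) = (parts, cur ++ [c]) from rfl]
    exact ih parts (cur ++ [c])

theorem pvIntercalate_cons (s a : List Char) (t : List Char) (ts : List (List Char)) :
    List.intercalate s (a :: t :: ts) = a ++ s ++ List.intercalate s (t :: ts) := by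
  simp [List.intercalate, List.intersperse]

theorem pvIntercalate_prep (s p : List Char) {S : List (List Char)} (h : S ≠ []) :
    List.intercalate s (pvPrep p S) = p ++ List.intercalate s S := by
  cases S with
  | nil => exact absurd rfl h
  | cons t ts =>
    cases ts with
    | nil => simp [pvPrep, List.intercalate]
    | cons t2 ts2 =>
      simp only [pvPrep]
      rw [pvIntercalate_cons, pvIntercalate_cons]
      simp [List.append_assoc]

theorem pvAsm_cons (b : Nat) (cur : List Char) (S : List (List Char))
    (hb : 1 ≤ b) (hS : S ≠ []) :
    pvAsm b (cur :: S) = String.mk cur :: pvAsm (b - 1) S := by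
  have hL : 1 ≤ S.length := List.length_pos_iff.mpr hS
  have hk : min b ((cur :: S).length - 1) = min (b - 1) (S.length - 1) + 1 := by
    simp only [List.length_cons]; omega
  simp only [pvAsm, hk, List.take_succ_cons, List.drop_succ_cons, List.map_cons,
    List.cons_append]

-- the unit machine has B's take/drop/space-join closed form
theorem pvU_closed (limit : Int) (us : List (Option Char)) :
    ∀ (parts : List String) (cur : List Char),
    pvFin (us.foldl (pvStepU limit) (parts, cur)) =
      parts ++ pvAsm (limit - parts.length).toNat (pvPrep cur (pvSegsR us)) := by
  induction us with
  | nil =>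
    intro parts cur
    by_cases h : cur = [] <;>
      simp [pvFin, pvAsm, pvPrep, pvSegsR, List.intercalate, h]
  | cons u us ih =>
    intro parts cur
    cases u with
    | some c =>
      simp only [List.foldl_cons]
      rw [show pvStepU limit (parts, cur) (some c) = (parts, cur ++ [c]) from rfl]
      rw [ih parts (cur ++ [c])]
      simp only [pvSegsR, pvPrep_prep]
    | none =>
      simp only [List.foldl_cons]
      by_cases hl : (parts.length : Int) < limit
      · rw [show pvStepU limit (parts, cur) none = (parts ++ [String.mk cur], []) from by
          simp [pvStepU, hl]]
        rw [ih (parts ++ [String.mk cur]) []]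
        rw [pvPrep_nil (pvSegsR_ne_nil us)]
        have hb : 1 ≤ (limit - (parts.length : Int)).toNat := by omega
        have hb1 : (limit - ((parts ++ [String.mk cur]).length : Int)).toNat
            = (limit - (parts.length : Int)).toNat - 1 := by
          simp only [List.length_append, List.length_cons, List.length_nil]
          push_cast
          omega
        rw [hb1]
        rw [show pvPrep cur (pvSegsR (none :: us)) = cur :: pvSegsR us from by
          simp [pvSegsR, pvPrep]]
        rw [pvAsm_cons _ _ _ hb (pvSegsR_ne_nil us)]
        simp [List.append_assoc]
      · rw [show pvStepU limit (parts, cur) none = (parts, cur ++ [' ']) from by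
          simp [pvStepU, hl]]
        rw [ih parts (cur ++ [' '])]
        have hk0 : (limit - (parts.length : Int)).toNat = 0 := by omega
        have hS : pvSegsR us ≠ [] := pvSegsR_ne_nil us
        have hI : List.intercalate [' '] (pvPrep (cur ++ [' ']) (pvSegsR us))
            = List.intercalate [' '] (pvPrep cur (pvSegsR (none :: us))) := by
          rw [pvIntercalate_prep _ _ hS]
          rw [show pvSegsR (none :: us) = [] :: pvSegsR us from rfl]
          rw [pvIntercalate_prep _ _ (by simp : ([] : List Char) :: pvSegsR us ≠ [])]
          cases hcase : pvSegsR us with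
          | nil => exact absurd hcase hS
          | cons t ts =>
            rw [pvIntercalate_cons]
            simp [List.append_assoc]
        simp only [pvAsm, hk0, Nat.zero_min, List.take_zero, List.drop_zero,
          List.map_nil, List.nil_append, hI]

-- ===== VERDICT (by name: the statement is the Claim_ definition above) =====
theorem split_key_py_spec : Claim_equal_split_key_py := by
  intro key limit _
  unfold Spec_split_key_py
  have hA : split_key_py key limit
      = pvFin ((pvUnits key.toList).foldl (pvStepU limit) ([], [])) := by
    have h := pvA_to_units limit key.toList [] []
    have h1 := congrArg Prod.fst h
    have h2 := congrArg Prod.snd h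
    simp only [split_key_py, pvFin]
    rw [← h1, ← h2]
  rw [hA, pvU_closed limit (pvUnits key.toList) [] []]
  rw [pvPrep_nil (pvSegsR_ne_nil _)]
  simp only [split_key_py_alt]
  rw [pvSegs_bridge (pvUnits key.toList) [] []]
  rw [pvPrep_nil (pvSegsR_ne_nil _)]
  have hmax : (max limit 0).toNat = (limit - (([] : List String).length : Int)).toNat := by
    simp; omega
  simp only [pvAsm, hmax, List.nil_append]
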